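-- pv_equiv track=rewrite | github.com/Hu-tech-hub/Coding_Test_Python | 07_Queue/queue_Questions.py | solution
-- ===== SOURCE A (Python) =====
-- from collections import deque
-- from collections import deque
--
-- def solution(progresses, speeds):
--     queue = deque()
--     answer = []
--     val = 0
--     for progress, speed in zip(progresses, speeds):
--         progress = 100 - progress
--         if progress % speed == 0:
--             queue.append(progress // speed)
--         else:
--             queue.append(progress // speed + 1)
--     while queue:
--         i = queue.popleft()
--         val = 1
--
--         if not queue:
--             answer.append(val)
--             break
--
--         while queue and queue[0] <= i:
--             queue.popleft()
--             val += 1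
--
--         answer.append(val)
--
--     return answer
-- ===== SOURCE B (Python) =====
-- def solution(progresses, speeds):
--     days = [-((p - 100) // s) for p, s in zip(progresses, speeds)]
--     if not days:
--         return []
--     answer = []
--     leader = days[0]
--     count = 1
--     for d in days[1:]:
--         if d <= leader:
--             count += 1
--         else:
--             answer.append(count)
--             leader = d
--             count = 1
--     answer.append(count)
--     return answer
-- ===== Notes on version B (the rewrite author's own statement) =====
-- stated objective: simpler
-- what changed: Replaces A's deque with its outer pop loop and nested inner pop loop by one linear scan over the days list that keeps a block leader and a running count, flushing the count whenever a day exceeds the leader.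
import Mathlib
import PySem

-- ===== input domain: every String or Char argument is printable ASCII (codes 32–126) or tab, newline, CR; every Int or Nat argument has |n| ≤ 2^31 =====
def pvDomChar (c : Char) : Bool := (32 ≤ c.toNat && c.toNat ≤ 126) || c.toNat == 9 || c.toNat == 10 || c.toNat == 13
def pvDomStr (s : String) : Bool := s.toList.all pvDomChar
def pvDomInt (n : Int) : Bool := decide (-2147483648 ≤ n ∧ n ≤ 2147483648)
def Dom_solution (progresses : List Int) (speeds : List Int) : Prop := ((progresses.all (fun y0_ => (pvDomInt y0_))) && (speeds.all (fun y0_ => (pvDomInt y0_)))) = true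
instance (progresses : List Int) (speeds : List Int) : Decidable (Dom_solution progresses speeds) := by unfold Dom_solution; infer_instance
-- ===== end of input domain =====

-- B replaces A's deque with nested pop loops by a single running scan over the days
-- list keeping a block leader and a count (objective: simpler).

-- ===== PORT A =====
-- inner while loop: pop elements from the front of the queue while they are ≤ i
def solutionDrain (i : Int) : List Int → Int → Int × List Int
  | [], val => (val, [])
  | h :: t, val => if h ≤ i then solutionDrain i t (val + 1) else (val, h :: t)

lemma solutionDrain_len (i : Int) (q : List Int) (v : Int) :
    (solutionDrain i q v).2.length ≤ q.length := by
  induction q generalizing v with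
  | nil => simp [solutionDrain]
  | cons h t ih =>
    simp only [solutionDrain]
    split_ifs
    · exact le_trans (ih _) (Nat.le_succ _)
    · exact le_refl _

-- outer while loop over the queue
def solutionOuter : List Int → List Int
  | [] => []
  | i :: rest =>
    if rest = [] then [1]
    else
      let r := solutionDrain i rest 1
      r.1 :: solutionOuter r.2
termination_by q => q.length
decreasing_by
  simpa using Nat.lt_succ_of_le (solutionDrain_len i rest 1)

def solution (progresses : List Int) (speeds : List Int) : List Int :=
  let queue := (List.zip progresses speeds).map (fun ps =>
    let progress := 100 - ps.1
    if PySem.Int.mod progress ps.2 = 0 then PySem.Int.floordiv progress ps.2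
    else PySem.Int.floordiv progress ps.2 + 1)
  solutionOuter queue

-- ===== PORT B =====
-- B's scan: leader = first day of the current block, count = size of the block so far
def solutionAltLoop : List Int → Int → Int → List Int
  | [], _, count => [count]
  | d :: rest, leader, count =>
    if d ≤ leader then solutionAltLoop rest leader (count + 1)
    else count :: solutionAltLoop rest d 1

def solution_alt (progresses : List Int) (speeds : List Int) : List Int :=
  let days := (List.zip progresses speeds).map (fun ps =>
    -(PySem.Int.floordiv (ps.1 - 100) ps.2))
  match days with
  | [] => []
  | d :: rest => solutionAltLoop rest d 1

-- ===== PRECONDITION & SPEC =====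
-- Pre_ excludes a zero speed among the used pairs, where A raises ZeroDivisionError.
def Pre_solution (progresses : List Int) (speeds : List Int) : Prop :=
  ∀ ps ∈ List.zip progresses speeds, ps.2 ≠ 0
instance (progresses : List Int) (speeds : List Int) : Decidable (Pre_solution progresses speeds) := by unfold Pre_solution; infer_instance

def pvWitness_solution : List Int × List Int := ([93, 30, 55], [1, 30, 5])

def Spec_solution (progresses : List Int) (speeds : List Int) (out : List Int) : Prop := out = solution_alt progresses speeds
instance (progresses : List Int) (speeds : List Int) (out : List Int) : Decidable (Spec_solution progresses speeds out) := by unfold Spec_solution; infer_instance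

-- ===== CLAIM (what is proved, stated in full; the proofs are below) =====
def Claim_equal_solution : Prop := ∀ (progresses : List Int) (speeds : List Int), Dom_solution progresses speeds → Pre_solution progresses speeds → Spec_solution progresses speeds (solution progresses speeds)

-- ===== LEMMAS AND PROOFS =====

-- ceiling division: A's if/else equals B's -((q neg) // s), for any nonzero divisor
lemma ceil_of_pos (q s : Int) (hs : 0 < s) :
    (if PySem.Int.mod q s = 0 then PySem.Int.floordiv q s else PySem.Int.floordiv q s + 1)
      = -(PySem.Int.floordiv (-q) s) := by
  have hd := PySem.Int.floordiv_mul_add_mod q s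
  have h0 := PySem.Int.mod_nonneg q hs
  have h1 := PySem.Int.mod_lt q hs
  symm
  split_ifs with h
  · rw [PySem.Int.neg_floordiv_neg_eq_iff_of_pos hs]
    constructor <;> nlinarith
  · rw [PySem.Int.neg_floordiv_neg_eq_iff_of_pos hs]
    have h2 : 0 < PySem.Int.mod q s := lt_of_le_of_ne h0 (Ne.symm h)
    constructor <;> nlinarith

lemma ceil_eq (q s : Int) (hs : s ≠ 0) :
    (if PySem.Int.mod q s = 0 then PySem.Int.floordiv q s else PySem.Int.floordiv q s + 1)
      = -(PySem.Int.floordiv (-q) s) := by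
  rcases lt_or_gt_of_ne hs with h | h
  · have e1 : PySem.Int.floordiv q s = PySem.Int.floordiv (-q) (-s) := by
      simpa using (PySem.Int.floordiv_neg_neg (-q) (-s)).symm
    have e2 : PySem.Int.mod q s = -(PySem.Int.mod (-q) (-s)) := by
      simpa using (PySem.Int.mod_neg_neg (-q) (-s)).symm
    have e3 : PySem.Int.floordiv (-q) s = PySem.Int.floordiv q (-s) := by
      simpa using (PySem.Int.floordiv_neg_neg (-q) s).symm
    rw [e1, e2, e3]
    have := ceil_of_pos (-q) (-s) (by omega)
    simpa [neg_eq_zero] using this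
  · exact ceil_of_pos q s h

-- the two day lists coincide under Pre_
lemma days_eq (progresses speeds : List Int) (hp : Pre_solution progresses speeds) :
    (List.zip progresses speeds).map (fun ps =>
      let progress := 100 - ps.1
      if PySem.Int.mod progress ps.2 = 0 then PySem.Int.floordiv progress ps.2
      else PySem.Int.floordiv progress ps.2 + 1)
    = (List.zip progresses speeds).map (fun ps =>
      -(PySem.Int.floordiv (ps.1 - 100) ps.2)) := by
  apply List.map_congr_left
  intro ps hmem
  have hs := hp ps hmem
  have : ps.1 - 100 = -(100 - ps.1) := by ring
  rw [this]
  exact ceil_eq (100 - ps.1) ps.2 hs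

-- B's scan equals A's drain-then-recurse on any block
lemma altLoop_eq_drain (rest : List Int) (leader count : Int) :
    solutionAltLoop rest leader count
      = (solutionDrain leader rest count).1 :: solutionOuter (solutionDrain leader rest count).2 := by
  induction rest generalizing leader count with
  | nil => simp [solutionAltLoop, solutionDrain, solutionOuter]
  | cons d t ih =>
    simp only [solutionAltLoop, solutionDrain]
    split_ifs with h
    · exact ih _ _
    · rw [solutionOuter]
      cases t with
      | nil => simp [solutionAltLoop, solutionOuter]
      | cons x xs => simp [ih d 1]

lemma outer_eq_alt (days : List Int) :
    (match days with
     | [] => ([] : List Int)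
     | d :: rest => solutionAltLoop rest d 1) = solutionOuter days := by
  cases days with
  | nil => simp [solutionOuter]
  | cons d rest =>
    cases rest with
    | nil => simp [solutionAltLoop, solutionOuter]
    | cons x xs =>
      rw [solutionOuter]
      simp [altLoop_eq_drain]

-- ===== VERDICT (by name: the statement is the Claim_ definition above) =====
theorem solution_spec : Claim_equal_solution := by
  intro progresses speeds _ hp
  unfold Spec_solution solution solution_alt
  rw [days_eq progresses speeds hp]
  exact (outer_eq_alt _).symm
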